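-- pv_equiv track=rewrite | github.com/vladmot45/SP_reader | app.py | pick_col
-- ===== SOURCE A (Python) =====
-- def pick_col(df_cols, wanted_label):
--     wanted = wanted_label.lower().strip()
--     for c in df_cols:
--         if str(c).strip().lower() == wanted:
--             return c
--     for c in df_cols:
--         if wanted in str(c).strip().lower():
--             return c
--     return None
-- ===== SOURCE B (Python) =====
-- def pick_col(df_cols, wanted_label):
--     wanted = wanted_label.lower().strip()
--     fallback = None
--     for c in df_cols:
--         n = str(c).strip().lower()
--         if n == wanted:
--             return c
--         if fallback is None and wanted in n:
--             fallback = c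
--     return fallback
-- ===== Notes on version B (the rewrite author's own statement) =====
-- stated objective: simpler
-- what changed: Replaces A's two sequential scans (exact match, then substring match) with one pass that returns on an exact match and maintains a first-substring-match fallback accumulator.
import Mathlib
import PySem

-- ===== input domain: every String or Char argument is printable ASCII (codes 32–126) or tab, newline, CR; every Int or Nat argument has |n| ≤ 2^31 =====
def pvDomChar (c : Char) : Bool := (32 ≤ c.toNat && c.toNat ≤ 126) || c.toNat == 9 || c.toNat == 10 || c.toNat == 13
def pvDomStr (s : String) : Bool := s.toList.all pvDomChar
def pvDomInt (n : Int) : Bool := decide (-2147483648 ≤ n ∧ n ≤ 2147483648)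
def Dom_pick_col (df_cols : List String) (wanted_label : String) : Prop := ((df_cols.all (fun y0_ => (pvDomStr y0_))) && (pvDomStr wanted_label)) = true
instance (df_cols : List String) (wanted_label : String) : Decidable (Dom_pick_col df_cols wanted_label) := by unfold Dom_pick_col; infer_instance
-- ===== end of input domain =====

-- B fuses A's two sequential scans into one pass with a first-substring-match fallback accumulator (objective: simpler).

-- ===== PORT A =====
-- first loop of A: return first column whose normalization equals wanted
def pickExact (cols : List String) (wanted : String) : Option String :=
  match cols with
  | [] => none
  | c :: rest =>
    if PySem.Str.lower (PySem.Str.strip c) == wanted then some c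
    else pickExact rest wanted

-- second loop of A: return first column whose normalization contains wanted
def pickSub (cols : List String) (wanted : String) : Option String :=
  match cols with
  | [] => none
  | c :: rest =>
    if PySem.Str.isIn wanted (PySem.Str.lower (PySem.Str.strip c)) then some c
    else pickSub rest wanted

def pick_col (df_cols : List String) (wanted_label : String) : Option String :=
  let wanted := PySem.Str.strip (PySem.Str.lower wanted_label)
  match pickExact df_cols wanted with
  | some c => some c
  | none => pickSub df_cols wanted

-- ===== PORT B =====
-- single pass: return immediately on exact match, record the first substring match in fb
def pickGo (cols : List String) (wanted : String) (fb : Option String) : Option String :=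
  match cols with
  | [] => fb
  | c :: rest =>
    let n := PySem.Str.lower (PySem.Str.strip c)
    if n == wanted then some c
    else pickGo rest wanted (if fb.isNone && PySem.Str.isIn wanted n then some c else fb)

def pick_col_alt (df_cols : List String) (wanted_label : String) : Option String :=
  pickGo df_cols (PySem.Str.strip (PySem.Str.lower wanted_label)) none

-- ===== PRECONDITION & SPEC =====
def Spec_pick_col (df_cols : List String) (wanted_label : String) (out : Option String) : Prop := out = pick_col_alt df_cols wanted_label
instance (df_cols : List String) (wanted_label : String) (out : Option String) : Decidable (Spec_pick_col df_cols wanted_label out) := by unfold Spec_pick_col; infer_instance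

-- ===== CLAIM (what is proved, stated in full; the proofs are below) =====
def Claim_equal_pick_col : Prop := ∀ (df_cols : List String) (wanted_label : String), Dom_pick_col df_cols wanted_label → Spec_pick_col df_cols wanted_label (pick_col df_cols wanted_label)

-- ===== LEMMAS AND PROOFS =====
-- invariant of B's loop: it is A's exact scan, falling back to fb, then to A's substring scan
theorem pickGo_eq (cols : List String) (wanted : String) (fb : Option String) :
    pickGo cols wanted fb =
      match pickExact cols wanted with
      | some c => some c
      | none => match fb with
                | some f => some f
                | none => pickSub cols wanted := by
  induction cols generalizing fb with
  | nil => cases fb <;> rfl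
  | cons c rest ih =>
    show (if PySem.Str.lower (PySem.Str.strip c) == wanted then some c
          else pickGo rest wanted
            (if fb.isNone && PySem.Str.isIn wanted (PySem.Str.lower (PySem.Str.strip c))
             then some c else fb)) = _
    by_cases h : (PySem.Str.lower (PySem.Str.strip c) == wanted) = true
    · rw [if_pos h]
      simp only [pickExact, if_pos h]
    · rw [if_neg h, ih]
      simp only [pickExact, pickSub, if_neg h]
      cases fb with
      | some f => rfl
      | none =>
        by_cases hs : PySem.Str.isIn wanted (PySem.Str.lower (PySem.Str.strip c)) = true
        · simp only [Option.isNone_none, Bool.true_and, hs, if_true]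
        · rw [Bool.not_eq_true] at hs
          simp only [Option.isNone_none, Bool.true_and, hs, Bool.false_eq_true, if_false]

-- ===== VERDICT (by name: the statement is the Claim_ definition above) =====
theorem pick_col_spec : Claim_equal_pick_col := by
  intro df_cols wanted_label _
  unfold Spec_pick_col pick_col pick_col_alt
  rw [pickGo_eq]
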